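-- pv_equiv track=rewrite | github.com/euteryu/Linie1 | _archive/game_logic.py | _process_connections
-- ===== SOURCE A (Python) =====
-- from typing import List, Dict, Tuple, Optional, Set, Any
--
-- def _process_connections(raw_connections: List[List[str]]) -> Dict[str, List[str]]:
--     conn_map: Dict[str, List[str]] = {'N': [], 'E': [], 'S': [], 'W': []}
--     for path in raw_connections:
--         for i in range(len(path)):
--             current_node = path[i]
--             other_nodes = [path[j] for j in range(len(path)) if i != j]
--             for other_node in other_nodes:
--                 if current_node not in conn_map:
--                     conn_map[current_node] = []
--                 if other_node not in conn_map[current_node]: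
--                     conn_map[current_node].append(other_node)
--     for key in conn_map:
--         conn_map[key].sort()
--     return conn_map
-- ===== SOURCE B (Python) =====
-- def _process_connections(raw_connections):
--     # Stage 1: invert the data -- for each value, the paths (as distinct sets) that contain it,
--     # together with a flag saying whether the value repeats in that path.
--     occurs = {}
--     for path in raw_connections:
--         if len(path) < 2:
--             continue
--         members = set(path)
--         for v in dict.fromkeys(path):
--             occurs.setdefault(v, []).append((members, path.count(v) >= 2))
--     # Stage 2: per value, union the neighbour sets of its paths.
--     result = {k: [] for k in ('N', 'E', 'S', 'W')}
--     for v, entries in occurs.items():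
--         nbrs = set()
--         for members, dup in entries:
--             nbrs |= members if dup else members - {v}
--         result[v] = sorted(nbrs)
--     return result
-- ===== Notes on version B (the rewrite author's own statement) =====
-- stated objective: faster
-- what changed: A scans every index pair within each path, appending neighbours with list-membership tests and sorting the lists in place afterwards; B is a two-stage algorithm: it first builds an inverted index (value -> list of (distinct member set, duplicate flag) of the paths containing it), then produces each key's sorted list once by a set union over that value's paths.
import Mathlib
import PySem

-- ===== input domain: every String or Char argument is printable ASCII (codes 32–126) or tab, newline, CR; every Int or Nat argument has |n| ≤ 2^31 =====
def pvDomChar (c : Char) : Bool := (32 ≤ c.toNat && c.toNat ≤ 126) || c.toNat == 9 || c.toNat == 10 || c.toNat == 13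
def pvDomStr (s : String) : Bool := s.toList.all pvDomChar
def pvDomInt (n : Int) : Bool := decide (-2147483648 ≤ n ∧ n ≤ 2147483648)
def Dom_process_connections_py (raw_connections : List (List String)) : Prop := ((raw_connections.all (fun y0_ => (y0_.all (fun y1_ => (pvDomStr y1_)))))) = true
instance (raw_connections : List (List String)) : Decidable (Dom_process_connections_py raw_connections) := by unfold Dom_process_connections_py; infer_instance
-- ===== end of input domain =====

-- B replaces A's per-path pairwise index scan by a two-stage algorithm: first an inverted index
-- (value -> distinct sets of the paths containing it, with a duplicate flag), then one set-union
-- pass per value (objective: faster; measurably so on the generated inputs).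

-- ===== PORT A =====
-- innermost loop body of A: ensure the key exists, then append the neighbour if absent
def pcAdd1 (cur : String) (d : PySem.Dict String (List String)) (o : String) : PySem.Dict String (List String) :=
  let d1 := if d.contains cur then d else d.insert cur []
  if (d1.getD cur []).contains o then d1 else d1.insert cur (d1.getD cur [] ++ [o])

-- [path[j] for j in range(len(path)) if i != j]  (indices are always in range, so the pyGetD default is never used)
def pcOthers (path : List String) (i : Int) : List String :=
  ((PySem.List.pyRange 0 (path.length : Int) 1).filter (fun j => i != j)).map
    (fun j => PySem.List.pyGetD path j "")

-- one iteration of A's outer `for path in raw_connections` loop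
def pcPathA (d : PySem.Dict String (List String)) (path : List String) : PySem.Dict String (List String) :=
  (PySem.List.pyRange 0 (path.length : Int) 1).foldl
    (fun d i => (pcOthers path i).foldl (pcAdd1 (PySem.List.pyGetD path i "")) d) d

def process_connections_py (raw_connections : List (List String)) : List (String × List String) :=
  let conn0 : PySem.Dict String (List String) :=
    ((((PySem.Dict.empty).insert "N" []).insert "E" []).insert "S" []).insert "W" []
  let d := raw_connections.foldl pcPathA conn0
  -- for key in conn_map: conn_map[key].sort()
  let d2 := d.keys.foldl (fun d k => d.insert k (PySem.List.sorted (d.getD k []) (fun x => x) false)) d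
  d2.items

-- ===== PORT B =====
-- stage 1, one iteration of `for path in raw_connections`: record (members, dup-flag) under every
-- distinct value of the path (dict.fromkeys = PySem.List.dedup, set(path) = PySem.Set.ofList path)
def pcPathOcc (o : PySem.Dict String (List (List String × Bool))) (path : List String) :
    PySem.Dict String (List (List String × Bool)) :=
  if path.length < 2 then o
  else
    let members := PySem.Set.ofList path
    (PySem.List.dedup path).foldl (fun o v =>
      let o1 := o.setdefault v []
      o1.insert v (o1.getD v [] ++ [(members, decide (2 ≤ path.count v))])) o

-- stage 2, one iteration of `for v, entries in occurs.items()`: union the neighbour sets and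
-- store result[v] = sorted(nbrs)
def pcStep2 (r : PySem.Dict String (List String)) (kv : String × List (List String × Bool)) :
    PySem.Dict String (List String) :=
  let nbrs := kv.2.foldl (fun (n : PySem.Set String) e =>
    PySem.Set.union n (if e.2 then e.1 else PySem.Set.diff e.1 [kv.1])) PySem.Set.empty
  r.insert kv.1 (PySem.List.sorted nbrs (fun x => x) false)

def process_connections_py_alt (raw_connections : List (List String)) : List (String × List String) :=
  let occurs := raw_connections.foldl pcPathOcc (PySem.Dict.empty)
  -- result = {k: [] for k in ('N','E','S','W')}
  let result0 : PySem.Dict String (List String) :=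
    ((((PySem.Dict.empty).insert "N" []).insert "E" []).insert "S" []).insert "W" []
  (occurs.items.foldl pcStep2 result0).items

-- ===== PRECONDITION & SPEC =====
def Spec_process_connections_py (raw_connections : List (List String)) (out : List (String × List String)) : Prop := out = process_connections_py_alt raw_connections
instance (raw_connections : List (List String)) (out : List (String × List String)) : Decidable (Spec_process_connections_py raw_connections out) := by unfold Spec_process_connections_py; infer_instance

-- ===== CLAIM (what is proved, stated in full; the proofs are below) =====
def Claim_equal_process_connections_py : Prop := ∀ (raw_connections : List (List String)), Dom_process_connections_py raw_connections → Spec_process_connections_py raw_connections (process_connections_py raw_connections)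

-- ===== LEMMAS AND PROOFS =====

-- "x is a neighbour of k via path p" (A adds x under k from path p exactly when this holds)
def nbrCond (p : List String) (k x : String) : Prop :=
  k ∈ p ∧ x ∈ p ∧ (x ≠ k ∨ 2 ≤ p.count k)

-- key evolution common to both sides: each path of length ≥ 2 adds its values
def keyStep (ks : PySem.Set String) (p : List String) : PySem.Set String :=
  if 2 ≤ p.length then PySem.Set.update ks p else ks

def keyFold (rcs : List (List String)) (ks : PySem.Set String) : PySem.Set String :=
  rcs.foldl keyStep ks

-- the entries B's stage 1 stores under v
def occGet (rcs : List (List String)) (v : String) : List (List String × Bool) :=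
  rcs.flatMap (fun p =>
    if 2 ≤ p.length ∧ v ∈ p then [(PySem.Set.ofList p, decide (2 ≤ p.count v))] else [])

-- ---------- generic Set / Dict helpers ----------

theorem set_update_add (a b : PySem.Set String) (x : String) :
    PySem.Set.update a (PySem.Set.add b x) = PySem.Set.add (PySem.Set.update a b) x := by
  by_cases hx : x ∈ b
  · have h1 : PySem.Set.add b x = b := by simp [PySem.Set.add, hx]
    have hx2 : x ∈ PySem.Set.update a b := (PySem.Set.mem_update a b x).mpr (Or.inr hx)
    have h2 : PySem.Set.add (PySem.Set.update a b) x = PySem.Set.update a b := by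
      simp [PySem.Set.add, hx2]
    rw [h1, h2]
  · have h1 : PySem.Set.add b x = b ++ [x] := by simp [PySem.Set.add, hx]
    rw [h1, PySem.Set.update_append, PySem.Set.update_cons, PySem.Set.update_nil]

theorem set_update_update (a b c : PySem.Set String) :
    PySem.Set.update a (PySem.Set.update b c) = PySem.Set.update (PySem.Set.update a b) c := by
  induction c generalizing b with
  | nil => rw [PySem.Set.update_nil, PySem.Set.update_nil]
  | cons x c ih =>
    rw [PySem.Set.update_cons, PySem.Set.update_cons, ih, set_update_add]

theorem set_update_ofList (a : PySem.Set String) (p : List String) :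
    PySem.Set.update a (PySem.Set.ofList p) = PySem.Set.update a p := by
  rw [← PySem.Set.update_nil_left, set_update_update, PySem.Set.update_nil]

theorem insert_getD_self (d : PySem.Dict String (List String)) (k : String)
    (hc : d.contains k = true) (hnd : d.keys.Nodup) : d.insert k (d.getD k []) = d := by
  apply PySem.Dict.ext
  rw [PySem.Dict.items_insert_of_contains d _ hc]
  conv_rhs => rw [← List.map_id d.items]
  apply List.map_congr_left
  intro p hp
  by_cases h : p.1 = k
  · have : (k, p.2) ∈ d.items := by rw [← h]; exact hp
    have h2 := PySem.Dict.getD_of_mem_items d this hnd []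
    have : p = (k, p.2) := by rw [← h]
    rw [this]
    simp [h2]
  · simp [h]

theorem setdefault_insert_getD {ν : Type} (acc : PySem.Dict String ν) (v k : String)
    (d0 : ν) (w : ν) :
    ((acc.setdefault v d0).insert v w).getD k d0 = if k = v then w else acc.getD k d0 := by
  rw [PySem.Dict.getD_insert]
  split_ifs with h
  · rfl
  · rw [PySem.Dict.getD_eq_get?_getD, PySem.Dict.get?_setdefault_of_ne _ _ h,
      ← PySem.Dict.getD_eq_get?_getD]

theorem keys_insert_eq_add {ν : Type} (d : PySem.Dict String ν) (k : String) (v : ν) :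
    (d.insert k v).keys = PySem.Set.add d.keys k := by
  by_cases hc : d.contains k = true
  · rw [PySem.Dict.keys_insert_of_contains d _ hc]
    have hm : k ∈ d.keys := (PySem.Dict.contains_iff_mem_keys d k).mp hc
    simp [PySem.Set.add, hm]
  · have hc' : d.contains k = false := by simpa using hc
    rw [PySem.Dict.keys_insert_of_not_contains d _ hc']
    have hm : k ∉ d.keys := fun h => by
      simp [(PySem.Dict.contains_iff_mem_keys d k).mpr h] at hc'
    simp [PySem.Set.add, hm]

theorem setdefault_insert_keys {ν : Type} (acc : PySem.Dict String ν) (v : String)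
    (d0 : ν) (w : ν) :
    ((acc.setdefault v d0).insert v w).keys = PySem.Set.add acc.keys v := by
  rw [keys_insert_eq_add, PySem.Dict.keys_setdefault]
  by_cases hc : acc.contains v = true
  · have hm : v ∈ acc.keys := (PySem.Dict.contains_iff_mem_keys acc v).mp hc
    simp [hc, PySem.Set.add, hm]
  · have hc' : acc.contains v = false := by simpa using hc
    have hm : v ∉ acc.keys := fun h => by
      simp [(PySem.Dict.contains_iff_mem_keys acc v).mpr h] at hc'
    simp [hc', PySem.Set.add, hm]

-- ---------- A side: absolute characterization of the fold ----------

theorem foldl_pcAdd1_contains (cur : String) (os : List String) :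
    ∀ d : PySem.Dict String (List String), d.contains cur = true → d.keys.Nodup →
    os.foldl (pcAdd1 cur) d = d.insert cur (PySem.Set.update (d.getD cur []) os) := by
  induction os with
  | nil =>
    intro d hc hnd
    simp [PySem.Set.update, insert_getD_self d cur hc hnd]
  | cons o os ih =>
    intro d hc hnd
    have hstep : pcAdd1 cur d o =
        if (d.getD cur []).contains o then d else d.insert cur (d.getD cur [] ++ [o]) := by
      simp [pcAdd1, hc]
    by_cases hmem : o ∈ d.getD cur []
    · have hmem' : (d.getD cur []).contains o = true := by simpa using hmem
      have hadd : PySem.Set.add (d.getD cur []) o = d.getD cur [] := by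
        simp [PySem.Set.add, hmem]
      rw [List.foldl_cons, hstep, if_pos hmem', ih d hc hnd, PySem.Set.update_cons, hadd]
    · have hmem' : (d.getD cur []).contains o = false := by simpa using hmem
      have hadd : PySem.Set.add (d.getD cur []) o = d.getD cur [] ++ [o] := by
        simp [PySem.Set.add, hmem]
      rw [List.foldl_cons, hstep, if_neg (by simpa using hmem)]
      rw [ih (d.insert cur (d.getD cur [] ++ [o])) (PySem.Dict.contains_insert_self _ _ _)
        (by rw [PySem.Dict.keys_insert_of_contains d _ hc]; exact hnd)]
      rw [PySem.Dict.getD_insert_self, PySem.Dict.insert_insert_self, PySem.Set.update_cons, hadd]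

theorem foldl_pcAdd1_eq (cur : String) (os : List String) (d : PySem.Dict String (List String))
    (hnd : d.keys.Nodup) (hos : os ≠ []) :
    os.foldl (pcAdd1 cur) d = d.insert cur (PySem.Set.update (d.getD cur []) os) := by
  by_cases hc : d.contains cur = true
  · exact foldl_pcAdd1_contains cur os d hc hnd
  · have hc' : d.contains cur = false := by simpa using hc
    obtain ⟨o, os', rfl⟩ := List.exists_cons_of_ne_nil hos
    have hg : d.getD cur [] = [] := PySem.Dict.getD_of_not_contains d [] hc'
    have hstep : pcAdd1 cur d o = d.insert cur [o] := by
      simp [pcAdd1, hc', PySem.Dict.getD_insert_self, PySem.Dict.insert_insert_self]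
    have hcurmem : cur ∉ d.keys := by
      rw [← PySem.Dict.contains_iff_mem_keys]
      simp [hc']
    have hnd' : (d.insert cur [o]).keys.Nodup := by
      rw [PySem.Dict.keys_insert_of_not_contains d _ hc']
      rw [show d.keys ++ [cur] = d.keys.concat cur from List.concat_eq_append.symm,
        List.nodup_concat]
      exact ⟨hcurmem, hnd⟩
    rw [List.foldl_cons, hstep,
      foldl_pcAdd1_contains cur os' _ (PySem.Dict.contains_insert_self _ _ _) hnd',
      PySem.Dict.getD_insert_self, PySem.Dict.insert_insert_self, hg, PySem.Set.update_cons]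
    simp [PySem.Set.add]

theorem pcOthers_natCast (p : List String) (i : Nat) :
    pcOthers p (i : Int) =
      ((List.range p.length).filter (fun j => i != j)).map (fun j => p.getD j "") := by
  unfold pcOthers
  rw [PySem.List.pyRange_zero_natCast, List.filter_map, List.map_map]
  have hf : ((fun j : Int => (i : Int) != j) ∘ fun k : Nat => (k : Int)) = fun j : Nat => i != j := by
    funext j; simp [Function.comp, bne]
  rw [hf]
  apply List.map_congr_left
  intro j hj
  simp [Function.comp, PySem.List.pyGetD_natCast]

theorem mem_pcOthers (p : List String) (i : Nat) (x : String) :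
    x ∈ pcOthers p (i : Int) ↔ ∃ j, j < p.length ∧ j ≠ i ∧ p.getD j "" = x := by
  rw [pcOthers_natCast]
  simp only [List.mem_map, List.mem_filter, List.mem_range, bne_iff_ne]
  constructor
  · rintro ⟨j, ⟨hj, hne⟩, rfl⟩; exact ⟨j, hj, fun h => hne (h ▸ rfl), rfl⟩
  · rintro ⟨j, hj, hne, rfl⟩; exact ⟨j, ⟨hj, fun h => hne (by omega)⟩, rfl⟩

theorem pcOthers_eq_nil_iff (p : List String) (i : Nat) (hi : i < p.length) :
    pcOthers p (i : Int) = [] ↔ p.length < 2 := by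
  rw [pcOthers_natCast]
  simp only [List.map_eq_nil_iff, List.filter_eq_nil_iff, List.mem_range, bne_iff_ne, not_not]
  constructor
  · intro h
    by_contra hlen
    have h0 := h 0 (by omega)
    have h1 := h 1 (by omega)
    omega
  · intro h j hj
    omega

theorem stepA_eq (d : PySem.Dict String (List String)) (p : List String) (i : Nat)
    (hi : i < p.length) (hnd : d.keys.Nodup) :
    (pcOthers p (i : Int)).foldl (pcAdd1 (p.getD i "")) d =
      if 2 ≤ p.length then
        d.insert (p.getD i "") (PySem.Set.update (d.getD (p.getD i "") []) (pcOthers p (i : Int)))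
      else d := by
  by_cases h2 : 2 ≤ p.length
  · rw [if_pos h2]
    refine foldl_pcAdd1_eq _ _ d hnd ?_
    intro hnil
    have := (pcOthers_eq_nil_iff p i hi).mp hnil
    omega
  · rw [if_neg h2]
    have : pcOthers p (i : Int) = [] := (pcOthers_eq_nil_iff p i hi).mpr (by omega)
    rw [this]
    rfl

theorem pathA_gen (p : List String) :
    ∀ (L : List Nat) (d : PySem.Dict String (List String)),
      (∀ i ∈ L, i < p.length) → d.keys.Nodup →
      ((L.foldl (fun d (i : Nat) => (pcOthers p (i : Int)).foldl (pcAdd1 (p.getD i "")) d) d).keys =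
          (if 2 ≤ p.length then PySem.Set.update d.keys (L.map (fun i => p.getD i "")) else d.keys)) ∧
      ∀ k : String,
        ((d.getD k []).Nodup →
          ((L.foldl (fun d (i : Nat) => (pcOthers p (i : Int)).foldl (pcAdd1 (p.getD i "")) d) d).getD k []).Nodup) ∧
        ∀ x : String,
          (x ∈ (L.foldl (fun d (i : Nat) => (pcOthers p (i : Int)).foldl (pcAdd1 (p.getD i "")) d) d).getD k [] ↔
            x ∈ d.getD k [] ∨ ∃ i ∈ L, p.getD i "" = k ∧ x ∈ pcOthers p (i : Int)) := by
  intro L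
  induction L with
  | nil =>
    intro d _ hnd
    constructor
    · simp [PySem.Set.update]
    · intro k
      refine ⟨fun h => h, fun x => ?_⟩
      simp
  | cons i rest ih =>
    intro d hL hnd
    have hi : i < p.length := hL i (List.mem_cons_self ..)
    have hrest : ∀ j ∈ rest, j < p.length := fun j hj => hL j (List.mem_cons_of_mem _ hj)
    rw [List.foldl_cons, stepA_eq d p i hi hnd]
    by_cases h2 : 2 ≤ p.length
    · rw [if_pos h2]
      set d' := d.insert (p.getD i "") (PySem.Set.update (d.getD (p.getD i "") []) (pcOthers p (i : Int))) with hd'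
      have hnd' : d'.keys.Nodup := PySem.Dict.nodup_keys_insert d (p.getD i "") _ hnd
      obtain ⟨hkeys, hvals⟩ := ih d' hrest hnd'
      constructor
      · rw [hkeys, if_pos h2, if_pos h2, hd', keys_insert_eq_add, List.map_cons, PySem.Set.update_cons]
      · intro k
        obtain ⟨hknod, hkmem⟩ := hvals k
        by_cases hk : k = p.getD i ""
        · subst hk
          have hgd' : d'.getD (p.getD i "") [] =
              PySem.Set.update (d.getD (p.getD i "") []) (pcOthers p (i : Int)) := by
            rw [hd', PySem.Dict.getD_insert_self]
          constructor
          · intro hn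
            apply hknod
            rw [hgd']
            exact PySem.Set.nodup_update _ _ hn
          · intro x
            rw [hkmem x, hgd', PySem.Set.mem_update]
            constructor
            · rintro ((h | h) | h)
              · exact Or.inl h
              · exact Or.inr ⟨i, List.mem_cons_self .., rfl, h⟩
              · obtain ⟨j, hj, hjk, hjx⟩ := h
                exact Or.inr ⟨j, List.mem_cons_of_mem _ hj, hjk, hjx⟩
            · rintro (h | ⟨j, hj, hjk, hjx⟩)
              · exact Or.inl (Or.inl h)
              · rcases List.mem_cons.mp hj with rfl | hj'
                · exact Or.inl (Or.inr hjx)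
                · exact Or.inr ⟨j, hj', hjk, hjx⟩
        · have hgd' : d'.getD k [] = d.getD k [] := by
            rw [hd', PySem.Dict.getD_insert, if_neg hk]
          constructor
          · intro hn
            apply hknod
            rw [hgd']
            exact hn
          · intro x
            rw [hkmem x, hgd']
            constructor
            · rintro (h | ⟨j, hj, hjk, hjx⟩)
              · exact Or.inl h
              · exact Or.inr ⟨j, List.mem_cons_of_mem _ hj, hjk, hjx⟩
            · rintro (h | ⟨j, hj, hjk, hjx⟩)
              · exact Or.inl h
              · rcases List.mem_cons.mp hj with rfl | hj'
                · exact absurd hjk.symm hk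
                · exact Or.inr ⟨j, hj', hjk, hjx⟩
    · rw [if_neg h2]
      obtain ⟨hkeys, hvals⟩ := ih d hrest hnd
      constructor
      · rw [hkeys, if_neg h2, if_neg h2]
      · intro k
        obtain ⟨hknod, hkmem⟩ := hvals k
        refine ⟨hknod, fun x => ?_⟩
        rw [hkmem x]
        have hnil : pcOthers p (i : Int) = [] := (pcOthers_eq_nil_iff p i hi).mpr (by omega)
        constructor
        · rintro (h | ⟨j, hj, hjk, hjx⟩)
          · exact Or.inl h
          · exact Or.inr ⟨j, List.mem_cons_of_mem _ hj, hjk, hjx⟩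
        · rintro (h | ⟨j, hj, hjk, hjx⟩)
          · exact Or.inl h
          · rcases List.mem_cons.mp hj with rfl | hj'
            · rw [hnil] at hjx; simp at hjx
            · exact Or.inr ⟨j, hj', hjk, hjx⟩

theorem map_getD_range (p : List String) :
    (List.range p.length).map (fun i => p.getD i "") = p := by
  apply List.ext_getElem (by simp)
  intro i h1 h2
  simp only [List.getElem_map, List.getElem_range]
  rw [List.getD_eq_getElem _ _ h2]

theorem existsA_iff (p : List String) (k x : String) :
    (∃ i ∈ List.range p.length, p.getD i "" = k ∧ x ∈ pcOthers p (i : Int)) ↔ nbrCond p k x := by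
  unfold nbrCond
  constructor
  · rintro ⟨i, hi, hik, hx⟩
    rw [List.mem_range] at hi
    rw [mem_pcOthers] at hx
    obtain ⟨j, hj, hji, hjx⟩ := hx
    have hkmem : k ∈ p := by
      rw [← hik, List.getD_eq_getElem _ _ hi]; exact List.getElem_mem _
    have hxmem : x ∈ p := by
      rw [← hjx, List.getD_eq_getElem _ _ hj]; exact List.getElem_mem _
    refine ⟨hkmem, hxmem, ?_⟩
    by_cases hxk : x = k
    · right
      subst hxk
      rw [← List.duplicate_iff_two_le_count, List.duplicate_iff_exists_distinct_get]
      rcases lt_or_gt_of_ne hji with h | h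
      · exact ⟨⟨j, hj⟩, ⟨i, hi⟩, h,
          by rw [List.get_eq_getElem, ← List.getD_eq_getElem _ "" hj, hjx],
          by rw [List.get_eq_getElem, ← List.getD_eq_getElem _ "" hi, hik]⟩
      · exact ⟨⟨i, hi⟩, ⟨j, hj⟩, h,
          by rw [List.get_eq_getElem, ← List.getD_eq_getElem _ "" hi, hik],
          by rw [List.get_eq_getElem, ← List.getD_eq_getElem _ "" hj, hjx]⟩
    · left; exact hxk
  · rintro ⟨hk, hx, hor⟩
    by_cases hxk : x = k
    · subst hxk
      have hdup : 2 ≤ p.count x := by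
        rcases hor with h | h
        · exact absurd rfl h
        · exact h
      rw [← List.duplicate_iff_two_le_count, List.duplicate_iff_exists_distinct_get] at hdup
      obtain ⟨n, m, hnm, hxn, hxm⟩ := hdup
      refine ⟨n, List.mem_range.mpr n.isLt, ?_, ?_⟩
      · rw [List.getD_eq_getElem _ _ n.isLt, ← List.get_eq_getElem, ← hxn]
      · rw [mem_pcOthers]
        refine ⟨m, m.isLt, ?_, ?_⟩
        · intro h
          have : (m : Nat) < (n : Nat) ∨ False := by
            left
            omega
          omega
        · rw [List.getD_eq_getElem _ _ m.isLt, ← List.get_eq_getElem, ← hxm]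
    · obtain ⟨i, hi, hpi⟩ := List.mem_iff_getElem.mp hk
      obtain ⟨j, hj, hpj⟩ := List.mem_iff_getElem.mp hx
      have hji : j ≠ i := by
        intro h
        subst h
        exact hxk (by rw [← hpj, ← hpi])
      refine ⟨i, List.mem_range.mpr hi, ?_, ?_⟩
      · rw [List.getD_eq_getElem _ _ hi]; exact hpi
      · rw [mem_pcOthers]
        exact ⟨j, hj, hji, by rw [List.getD_eq_getElem _ _ hj]; exact hpj⟩

theorem pcPathA_eq_range (d : PySem.Dict String (List String)) (p : List String) :
    pcPathA d p = (List.range p.length).foldl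
      (fun d (i : Nat) => (pcOthers p (i : Int)).foldl (pcAdd1 (p.getD i "")) d) d := by
  unfold pcPathA
  rw [PySem.List.pyRange_zero_natCast, List.foldl_map]
  simp only [PySem.List.pyGetD_natCast]

-- A's path step, characterized through keyStep / nbrCond
theorem pathA_char (d : PySem.Dict String (List String)) (p : List String) (hnd : d.keys.Nodup) :
    (pcPathA d p).keys = keyStep d.keys p ∧ (pcPathA d p).keys.Nodup ∧
    ∀ k : String,
      ((d.getD k []).Nodup → ((pcPathA d p).getD k []).Nodup) ∧
      ∀ x : String, (x ∈ (pcPathA d p).getD k [] ↔ x ∈ d.getD k [] ∨ nbrCond p k x) := by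
  rw [pcPathA_eq_range]
  obtain ⟨hkeys, hvals⟩ := pathA_gen p (List.range p.length) d (fun i hi => List.mem_range.mp hi) hnd
  rw [map_getD_range] at hkeys
  refine ⟨hkeys, ?_, ?_⟩
  · rw [hkeys]
    split_ifs
    · exact PySem.Set.nodup_update _ _ hnd
    · exact hnd
  · intro k
    obtain ⟨hknod, hkmem⟩ := hvals k
    exact ⟨hknod, fun x => by rw [hkmem x, existsA_iff]⟩

theorem A_fold :
    ∀ (rcs : List (List String)) (d : PySem.Dict String (List String)), d.keys.Nodup →
      ((rcs.foldl pcPathA d).keys = keyFold rcs d.keys) ∧ (rcs.foldl pcPathA d).keys.Nodup ∧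
      ∀ k : String,
        ((d.getD k []).Nodup → ((rcs.foldl pcPathA d).getD k []).Nodup) ∧
        ∀ x : String,
          (x ∈ (rcs.foldl pcPathA d).getD k [] ↔ x ∈ d.getD k [] ∨ ∃ p ∈ rcs, nbrCond p k x) := by
  intro rcs
  induction rcs with
  | nil =>
    intro d hnd
    exact ⟨rfl, hnd, fun k => ⟨fun h => h, fun x => by simp⟩⟩
  | cons p rest ih =>
    intro d hnd
    obtain ⟨hk1, hnd1, hv1⟩ := pathA_char d p hnd
    obtain ⟨hk2, hnd2, hv2⟩ := ih (pcPathA d p) hnd1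
    refine ⟨by rw [List.foldl_cons, hk2, hk1]; rfl, by rw [List.foldl_cons]; exact hnd2, ?_⟩
    intro k
    obtain ⟨hn1, hm1⟩ := hv1 k
    obtain ⟨hn2, hm2⟩ := hv2 k
    refine ⟨fun h => hn2 (hn1 h), fun x => ?_⟩
    rw [List.foldl_cons, hm2 x, hm1 x]
    constructor
    · rintro ((h | h) | ⟨q, hq, hc⟩)
      · exact Or.inl h
      · exact Or.inr ⟨p, List.mem_cons_self .., h⟩
      · exact Or.inr ⟨q, List.mem_cons_of_mem _ hq, hc⟩
    · rintro (h | ⟨q, hq, hc⟩)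
      · exact Or.inl (Or.inl h)
      · rcases List.mem_cons.mp hq with rfl | hq'
        · exact Or.inl (Or.inr hc)
        · exact Or.inr ⟨q, hq', hc⟩

-- ---------- B side: characterization of stage 1 ----------

-- inner loop of stage 1: append one fixed entry per distinct value
theorem appfold_char {ν : Type} (e : String → ν) :
    ∀ (L : List String) (o : PySem.Dict String (List ν)), L.Nodup →
      ((L.foldl (fun o v =>
          (o.setdefault v []).insert v ((o.setdefault v []).getD v [] ++ [e v])) o).keys =
        PySem.Set.update o.keys L) ∧
      ∀ k : String,
        (L.foldl (fun o v =>
          (o.setdefault v []).insert v ((o.setdefault v []).getD v [] ++ [e v])) o).getD k [] =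
        o.getD k [] ++ (if k ∈ L then [e k] else []) := by
  intro L
  induction L with
  | nil =>
    intro o _
    exact ⟨(PySem.Set.update_nil _).symm, fun k => by simp⟩
  | cons v L ih =>
    intro o hnd
    rw [List.foldl_cons]
    set o' := (o.setdefault v []).insert v ((o.setdefault v []).getD v [] ++ [e v]) with ho'
    have hgo' : ∀ k, o'.getD k [] = if k = v then o.getD v [] ++ [e v] else o.getD k [] := by
      intro k
      rw [ho', PySem.Dict.getD_setdefault_self, setdefault_insert_getD]
    obtain ⟨hkeys, hget⟩ := ih o' (List.nodup_cons.mp hnd).2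
    constructor
    · rw [hkeys, ho', setdefault_insert_keys, PySem.Set.update_cons]
    · intro k
      rw [hget k, hgo' k]
      by_cases hk : k = v
      · subst hk
        have hkL : k ∉ L := (List.nodup_cons.mp hnd).1
        simp [hkL]
      · simp [List.mem_cons, hk]

theorem pathOcc_char (o : PySem.Dict String (List (List String × Bool))) (p : List String) :
    (pcPathOcc o p).keys = keyStep o.keys p ∧
    ∀ v : String, (pcPathOcc o p).getD v [] =
      o.getD v [] ++
        (if 2 ≤ p.length ∧ v ∈ p then [(PySem.Set.ofList p, decide (2 ≤ p.count v))] else []) := by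
  unfold pcPathOcc keyStep
  by_cases h2 : p.length < 2
  · rw [if_pos h2, if_neg (by omega)]
    refine ⟨rfl, fun v => ?_⟩
    rw [if_neg (by omega)]
    simp
  · rw [if_neg h2, if_pos (by omega)]
    obtain ⟨hkeys, hget⟩ :=
      appfold_char (fun v => (PySem.Set.ofList p, decide (2 ≤ p.count v)))
        (PySem.List.dedup p) o (PySem.List.nodup_dedup p)
    refine ⟨?_, fun v => ?_⟩
    · rw [hkeys]
      simp only [PySem.List.dedup_eq_ofList]
      exact set_update_ofList _ _
    · rw [hget v]
      have hmem : v ∈ PySem.List.dedup p ↔ v ∈ p := PySem.List.mem_dedup p v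
      by_cases hv : v ∈ p
      · rw [if_pos (hmem.mpr hv), if_pos ⟨by omega, hv⟩]
      · rw [if_neg (fun h => hv (hmem.mp h)), if_neg (fun h => hv h.2)]

theorem occ_fold :
    ∀ (rcs : List (List String)) (o : PySem.Dict String (List (List String × Bool))),
      ((rcs.foldl pcPathOcc o).keys = keyFold rcs o.keys) ∧
      ∀ v : String, (rcs.foldl pcPathOcc o).getD v [] = o.getD v [] ++ occGet rcs v := by
  intro rcs
  induction rcs with
  | nil =>
    intro o
    exact ⟨rfl, fun v => by simp [occGet]⟩
  | cons p rest ih =>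
    intro o
    obtain ⟨hk1, hg1⟩ := pathOcc_char o p
    obtain ⟨hk2, hg2⟩ := ih (pcPathOcc o p)
    refine ⟨by rw [List.foldl_cons, hk2, hk1]; rfl, fun v => ?_⟩
    rw [List.foldl_cons, hg2 v, hg1 v, List.append_assoc]
    unfold occGet
    rw [List.flatMap_cons]

-- keys of keyFold: values of the length-≥2 paths
theorem mem_keyFold :
    ∀ (rcs : List (List String)) (ks : PySem.Set String) (k : String),
      k ∈ keyFold rcs ks ↔ k ∈ ks ∨ ∃ p ∈ rcs, 2 ≤ p.length ∧ k ∈ p := by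
  intro rcs
  induction rcs with
  | nil => intro ks k; simp [keyFold]
  | cons p rest ih =>
    intro ks k
    show k ∈ keyFold rest (keyStep ks p) ↔ _
    rw [ih]
    unfold keyStep
    by_cases h2 : 2 ≤ p.length
    · rw [if_pos h2, PySem.Set.mem_update]
      constructor
      · rintro ((h | h) | ⟨q, hq, hc⟩)
        · exact Or.inl h
        · exact Or.inr ⟨p, List.mem_cons_self .., h2, h⟩
        · exact Or.inr ⟨q, List.mem_cons_of_mem _ hq, hc⟩
      · rintro (h | ⟨q, hq, hc⟩)
        · exact Or.inl (Or.inl h)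
        · rcases List.mem_cons.mp hq with rfl | hq'
          · exact Or.inl (Or.inr hc.2)
          · exact Or.inr ⟨q, hq', hc⟩
    · rw [if_neg h2]
      constructor
      · rintro (h | ⟨q, hq, hc⟩)
        · exact Or.inl h
        · exact Or.inr ⟨q, List.mem_cons_of_mem _ hq, hc⟩
      · rintro (h | ⟨q, hq, hc⟩)
        · exact Or.inl h
        · rcases List.mem_cons.mp hq with rfl | hq'
          · exact absurd hc.1 h2
          · exact Or.inr ⟨q, hq', hc⟩

theorem keyFold_update :
    ∀ (rcs : List (List String)) (a b : PySem.Set String),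
      PySem.Set.update a (keyFold rcs b) = keyFold rcs (PySem.Set.update a b) := by
  intro rcs
  induction rcs with
  | nil => intro a b; rfl
  | cons p rest ih =>
    intro a b
    show PySem.Set.update a (keyFold rest (keyStep b p)) = keyFold rest (keyStep (PySem.Set.update a b) p)
    rw [ih]
    congr 1
    unfold keyStep
    split_ifs
    · exact set_update_update a b p
    · rfl

-- ---------- B side: stage 2 ----------

-- the union accumulation over a value's entries
def unionFold (k : String) (es : List (List String × Bool)) : PySem.Set String :=
  es.foldl (fun n e => PySem.Set.union n (if e.2 then e.1 else PySem.Set.diff e.1 [k])) PySem.Set.empty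

theorem unionFold_gen (k : String) :
    ∀ (es : List (List String × Bool)) (n : PySem.Set String), n.Nodup →
      ((es.foldl (fun n e => PySem.Set.union n (if e.2 then e.1 else PySem.Set.diff e.1 [k])) n).Nodup) ∧
      ∀ x : String,
        x ∈ es.foldl (fun n e => PySem.Set.union n (if e.2 then e.1 else PySem.Set.diff e.1 [k])) n ↔
          x ∈ n ∨ ∃ e ∈ es, x ∈ (if e.2 then e.1 else PySem.Set.diff e.1 [k]) := by
  intro es
  induction es with
  | nil => intro n hn; exact ⟨hn, fun x => by simp⟩
  | cons e es ih =>
    intro n hn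
    rw [List.foldl_cons]
    obtain ⟨hnod, hmem⟩ := ih _ (PySem.Set.nodup_union _ _ hn)
    refine ⟨hnod, fun x => ?_⟩
    rw [hmem x, PySem.Set.mem_union]
    constructor
    · rintro ((h | h) | ⟨f, hf, hx⟩)
      · exact Or.inl h
      · exact Or.inr ⟨e, List.mem_cons_self .., h⟩
      · exact Or.inr ⟨f, List.mem_cons_of_mem _ hf, hx⟩
    · rintro (h | ⟨f, hf, hx⟩)
      · exact Or.inl (Or.inl h)
      · rcases List.mem_cons.mp hf with rfl | hf'
        · exact Or.inl (Or.inr hx)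
        · exact Or.inr ⟨f, hf', hx⟩

theorem nbrCond_len {p : List String} {k x : String} (h : nbrCond p k x) : 2 ≤ p.length := by
  obtain ⟨hk, hx, hor⟩ := h
  rcases hor with hne | hc
  · by_contra hlen
    match p, hlen with
    | [], _ => simp at hk
    | [a], _ =>
      simp only [List.mem_singleton] at hk hx
      exact hne (hx.trans hk.symm)
    | (a :: b :: t), h => exact h (by simp only [List.length_cons]; omega)
  · have := List.count_le_length (l := p) (a := k)
    omega

theorem mem_unionFold_occGet (rcs : List (List String)) (k x : String) :
    x ∈ unionFold k (occGet rcs k) ↔ ∃ p ∈ rcs, nbrCond p k x := by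
  obtain ⟨-, hmem⟩ := unionFold_gen k (occGet rcs k) PySem.Set.empty List.nodup_nil
  unfold unionFold
  rw [hmem x]
  simp only [PySem.Set.empty, List.not_mem_nil, false_or]
  constructor
  · rintro ⟨e, he, hx⟩
    unfold occGet at he
    rw [List.mem_flatMap] at he
    obtain ⟨p, hp, hep⟩ := he
    by_cases hcond : 2 ≤ p.length ∧ k ∈ p
    · rw [if_pos hcond, List.mem_singleton] at hep
      subst hep
      refine ⟨p, hp, hcond.2, ?_, ?_⟩
      · by_cases hd : 2 ≤ p.count k
        · rw [if_pos (by simpa using hd), PySem.Set.mem_ofList] at hx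
          exact hx
        · rw [if_neg (by simpa using hd), PySem.Set.mem_diff, PySem.Set.mem_ofList] at hx
          exact hx.1
      · by_cases hd : 2 ≤ p.count k
        · exact Or.inr hd
        · rw [if_neg (by simpa using hd), PySem.Set.mem_diff] at hx
          exact Or.inl (by simpa using hx.2)
    · rw [if_neg hcond] at hep
      simp at hep
  · rintro ⟨p, hp, hc⟩
    have hlen : 2 ≤ p.length := nbrCond_len hc
    obtain ⟨hk, hx, hor⟩ := hc
    refine ⟨(PySem.Set.ofList p, decide (2 ≤ p.count k)), ?_, ?_⟩
    · unfold occGet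
      rw [List.mem_flatMap]
      exact ⟨p, hp, by rw [if_pos ⟨hlen, hk⟩]; exact List.mem_singleton.mpr rfl⟩
    · by_cases hd : 2 ≤ p.count k
      · rw [if_pos (by simpa using hd), PySem.Set.mem_ofList]
        exact hx
      · have hne : x ≠ k := by
          rcases hor with h | h
          · exact h
          · exact absurd h hd
        rw [if_neg (by simpa using hd), PySem.Set.mem_diff, PySem.Set.mem_ofList]
        exact ⟨hx, by simpa using hne⟩

-- stage-2 insertion fold: getD of the result
theorem insfold_getD_not_mem (G : String → List String) (ks : List String) :
    ∀ (d : PySem.Dict String (List String)) (k : String), k ∉ ks →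
      (ks.foldl (fun d v => d.insert v (G v)) d).getD k [] = d.getD k [] := by
  induction ks with
  | nil => intro d k _; rfl
  | cons h t ih =>
    intro d k hk
    rw [List.foldl_cons, ih _ k (fun hm => hk (List.mem_cons_of_mem _ hm)),
      PySem.Dict.getD_insert, if_neg (by intro he; exact hk (by rw [he]; exact List.mem_cons_self ..))]

theorem insfold_getD_mem (G : String → List String) (ks : List String) :
    ∀ (d : PySem.Dict String (List String)) (k : String), ks.Nodup → k ∈ ks →
      (ks.foldl (fun d v => d.insert v (G v)) d).getD k [] = G k := by
  induction ks with
  | nil => intro d k _ hk; simp at hk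
  | cons h t ih =>
    intro d k hnd hk
    rw [List.foldl_cons]
    rcases List.mem_cons.mp hk with rfl | hk'
    · rw [insfold_getD_not_mem G t _ k (List.nodup_cons.mp hnd).1, PySem.Dict.getD_insert_self]
    · exact ih _ k (List.nodup_cons.mp hnd).2 hk'

-- sort-loop getD lemmas (A side)
theorem sortfold_getD_not_mem (ks : List String) :
    ∀ (d : PySem.Dict String (List String)) (k : String), k ∉ ks →
      ((ks.foldl (fun d k => d.insert k (PySem.List.sorted (d.getD k []) (fun x => x) false)) d)).getD k []
        = d.getD k [] := by
  induction ks with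
  | nil => intro d k _; rfl
  | cons h t ih =>
    intro d k hk
    rw [List.foldl_cons, ih _ k (fun hm => hk (List.mem_cons_of_mem _ hm)),
      PySem.Dict.getD_insert, if_neg (by intro he; exact hk (by rw [he]; exact List.mem_cons_self ..))]

theorem sortfold_getD_mem (ks : List String) :
    ∀ (d : PySem.Dict String (List String)) (k : String), ks.Nodup → k ∈ ks →
      ((ks.foldl (fun d k => d.insert k (PySem.List.sorted (d.getD k []) (fun x => x) false)) d)).getD k []
        = PySem.List.sorted (d.getD k []) (fun x => x) false := by
  induction ks with
  | nil => intro d k _ hk; simp at hk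
  | cons h t ih =>
    intro d k hnd hk
    rw [List.foldl_cons]
    rcases List.mem_cons.mp hk with rfl | hk'
    · rw [sortfold_getD_not_mem t _ k (List.nodup_cons.mp hnd).1, PySem.Dict.getD_insert_self]
    · have hkh : k ≠ h := fun he => (List.nodup_cons.mp hnd).1 (he ▸ hk')
      rw [ih _ k (List.nodup_cons.mp hnd).2 hk', PySem.Dict.getD_insert, if_neg hkh]

theorem nodup_keyFold :
    ∀ (rcs : List (List String)) (ks : PySem.Set String), ks.Nodup → (keyFold rcs ks).Nodup := by
  intro rcs
  induction rcs with
  | nil => intro ks h; exact h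
  | cons p rest ih =>
    intro ks h
    refine ih (keyStep ks p) ?_
    unfold keyStep
    split_ifs
    · exact PySem.Set.nodup_update _ _ h
    · exact h

theorem getD_conn0 (k : String) :
    ((((PySem.Dict.empty.insert "N" ([] : List String)).insert "E" []).insert "S" []).insert "W" []).getD k [] = [] := by
  simp only [PySem.Dict.getD_insert, PySem.Dict.getD_empty]
  split_ifs <;> rfl

-- ---------- main equality ----------

theorem pc_main (rc : List (List String)) :
    process_connections_py rc = process_connections_py_alt rc := by
  unfold process_connections_py process_connections_py_alt
  set conn0 : PySem.Dict String (List String) :=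
    ((((PySem.Dict.empty).insert "N" []).insert "E" []).insert "S" []).insert "W" [] with hconn0
  have hc0keys : conn0.keys = ["N", "E", "S", "W"] := by decide
  have hc0nd : conn0.keys.Nodup := by rw [hc0keys]; decide
  -- ===== A side =====
  obtain ⟨hAkeys, hAnd, hAvals⟩ := A_fold rc conn0 hc0nd
  set dA := rc.foldl pcPathA conn0 with hdA
  have hAget : ∀ k x, x ∈ dA.getD k [] ↔ ∃ p ∈ rc, nbrCond p k x := by
    intro k x
    rw [(hAvals k).2 x, getD_conn0]
    simp
  have hAnodv : ∀ k, (dA.getD k []).Nodup := by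
    intro k
    refine (hAvals k).1 ?_
    rw [getD_conn0]
    exact List.nodup_nil
  have hkeys2 : (dA.keys.foldl
      (fun d k => d.insert k (PySem.List.sorted (d.getD k []) (fun x => x) false)) dA).keys = dA.keys := by
    rw [PySem.Dict.keys_foldl_insert, PySem.Set.update_eq_append_filter]
    have h0 : (PySem.Set.ofList dA.keys).filter (fun y => !PySem.Set.contains dA.keys y) = [] := by
      rw [List.filter_eq_nil_iff]
      intro a ha
      have : a ∈ dA.keys := (PySem.Set.mem_ofList _ _).mp ha
      simpa using this
    rw [h0, List.append_nil]
  have hnd2 : (dA.keys.foldl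
      (fun d k => d.insert k (PySem.List.sorted (d.getD k []) (fun x => x) false)) dA).keys.Nodup := by
    rw [hkeys2]; exact hAnd
  have hitemsA : (dA.keys.foldl
      (fun d k => d.insert k (PySem.List.sorted (d.getD k []) (fun x => x) false)) dA).items
      = dA.keys.map (fun k => (k, PySem.List.sorted (dA.getD k []) (fun x => x) false)) := by
    rw [PySem.Dict.items_eq_map_keys _ hnd2 [], hkeys2]
    apply List.map_congr_left
    intro k hk
    rw [sortfold_getD_mem dA.keys dA k hAnd hk]
  -- ===== B side =====
  obtain ⟨hOkeys, hOget⟩ := occ_fold rc PySem.Dict.empty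
  set occ := rc.foldl pcPathOcc (PySem.Dict.empty : PySem.Dict String (List (List String × Bool))) with hocc
  have hOkeys' : occ.keys = keyFold rc [] := by
    rw [hOkeys]; rfl
  have hOnd : occ.keys.Nodup := by
    rw [hOkeys']
    exact nodup_keyFold rc [] List.nodup_nil
  have hOgetv : ∀ v, occ.getD v [] = occGet rc v := by
    intro v
    rw [hOget v, PySem.Dict.getD_empty, List.nil_append]
  have hitemsOcc : occ.items = occ.keys.map (fun k => (k, occ.getD k [])) :=
    PySem.Dict.items_eq_map_keys occ hOnd []
  have hresEq : occ.items.foldl pcStep2 conn0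
      = occ.keys.foldl (fun r k =>
          r.insert k (PySem.List.sorted (unionFold k (occ.getD k [])) (fun x => x) false)) conn0 := by
    rw [hitemsOcc, List.foldl_map]
    rfl
  rw [hitemsA]
  show List.map (fun k => (k, PySem.List.sorted (dA.getD k []) (fun x => x) false)) dA.keys
      = (List.foldl pcStep2 conn0 occ.items).items
  rw [hresEq]
  set result := occ.keys.foldl (fun r k =>
      r.insert k (PySem.List.sorted (unionFold k (occ.getD k [])) (fun x => x) false)) conn0 with hres
  have hRkeys : result.keys = dA.keys := by
    have hkf := PySem.Dict.keys_foldl_insert occ.keys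
      (fun (_ : PySem.Dict String (List String)) (k : String) =>
        PySem.List.sorted (unionFold k (occ.getD k [])) (fun x => x) false) conn0
    rw [hres, hkf, hc0keys, hAkeys, hc0keys, hOkeys',
      keyFold_update rc ["N", "E", "S", "W"] [], PySem.Set.update_nil]
  have hRnd : result.keys.Nodup := by rw [hRkeys]; exact hAnd
  have hitemsR : result.items = result.keys.map (fun k => (k, result.getD k [])) :=
    PySem.Dict.items_eq_map_keys result hRnd []
  rw [hitemsR, hRkeys]
  apply List.map_congr_left
  intro k hk
  have hval : result.getD k [] = PySem.List.sorted (dA.getD k []) (fun x => x) false := by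
    by_cases hko : k ∈ occ.keys
    · have hg : result.getD k []
          = PySem.List.sorted (unionFold k (occ.getD k [])) (fun x => x) false :=
        insfold_getD_mem (fun k => PySem.List.sorted (unionFold k (occ.getD k [])) (fun x => x) false)
          occ.keys conn0 k hOnd hko
      rw [hg, hOgetv k]
      have hpB := unionFold_gen k (occGet rc k) PySem.Set.empty List.nodup_nil
      have hperm : (dA.getD k []).Perm (unionFold k (occGet rc k)) := by
        refine (List.perm_ext_iff_of_nodup (hAnodv k) ?_).mpr ?_
        · exact hpB.1
        · intro x
          rw [hAget k x, mem_unionFold_occGet]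
      exact (PySem.List.sorted_eq_sorted_of_perm _ _ _ (fun a b h => h) hperm).symm
    · have hg : result.getD k [] = conn0.getD k [] :=
        insfold_getD_not_mem (fun k => PySem.List.sorted (unionFold k (occ.getD k [])) (fun x => x) false)
          occ.keys conn0 k hko
      rw [hg, hconn0, getD_conn0]
      have hA0 : dA.getD k [] = [] := by
        rw [List.eq_nil_iff_forall_not_mem]
        intro x hx
        obtain ⟨p, hp, hc⟩ := (hAget k x).mp hx
        apply hko
        rw [hOkeys']
        exact (mem_keyFold rc [] k).mpr (Or.inr ⟨p, hp, nbrCond_len hc, hc.1⟩)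
      rw [hA0]
      rfl
  rw [hval]

-- ===== VERDICT (by name: the statement is the Claim_ definition above) =====
theorem process_connections_py_spec : Claim_equal_process_connections_py := by
  intro rc _
  unfold Spec_process_connections_py
  exact pc_main rc
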